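-- pv_equiv track=rewrite | github.com/danimelsz/PrepDyn | src/prepDyn_auxiliary.py | remove_all_gap_columns
-- ===== SOURCE A (Python) =====
-- def remove_all_gap_columns(alignment):
--     """
--     Remove columns from the alignment where all terminal sequences have a gap ('-').
--
--     Parameters:
--         alignment (dict): A dictionary where keys are sequence names and values are sequence strings.
--
--     Returns:
--         dict: Updated alignment with columns removed where all terminal sequences have a gap.
--     """
--     # Convert the alignment to a list of sequences
--     sequences = list(alignment.values())
--     num_sequences = len(sequences)
--     seq_length = len(sequences[0])  # Assuming all sequences are the same length
--
--     # Identify columns that need to be removed (where all terminal sequences have a gap)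
--     columns_to_remove = []
--     for col in range(seq_length):
--         # Check if all terminal sequences (sp1, sp2, ...) have a gap ('-') in this column
--         if all(seq[col] == '-' for seq in sequences):
--             columns_to_remove.append(col)
--
--     # Remove the identified columns from each sequence
--     for seq_name, seq in alignment.items():
--         # Create a new sequence with the columns removed
--         new_seq = ''.join(seq[col] for col in range(seq_length) if col not in columns_to_remove)
--         alignment[seq_name] = new_seq
--
--     return alignment
-- ===== SOURCE B (Python) =====
-- def remove_all_gap_columns(alignment):
--     # Transpose the sequences into columns and keep the columns that contain
--     # any non-gap character, then rebuild each sequence from the kept columns.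
--     # Mutates `alignment` in place, like the original.
--     sequences = list(alignment.values())
--     kept = [col for col in zip(*sequences) if any(c != '-' for c in col)]
--     for i, name in enumerate(alignment):
--         alignment[name] = ''.join(col[i] for col in kept)
--     return alignment
-- ===== Notes on version B (the rewrite author's own statement) =====
-- stated objective: simpler
-- what changed: B transposes the alignment into columns with zip(*sequences) and filters whole columns, instead of A's two index loops (one collecting column indices into a list, one rebuilding each sequence with a 'col not in columns_to_remove' scan); B also returns naturally (empty/truncated) where A raises IndexError.
import Mathlib
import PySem

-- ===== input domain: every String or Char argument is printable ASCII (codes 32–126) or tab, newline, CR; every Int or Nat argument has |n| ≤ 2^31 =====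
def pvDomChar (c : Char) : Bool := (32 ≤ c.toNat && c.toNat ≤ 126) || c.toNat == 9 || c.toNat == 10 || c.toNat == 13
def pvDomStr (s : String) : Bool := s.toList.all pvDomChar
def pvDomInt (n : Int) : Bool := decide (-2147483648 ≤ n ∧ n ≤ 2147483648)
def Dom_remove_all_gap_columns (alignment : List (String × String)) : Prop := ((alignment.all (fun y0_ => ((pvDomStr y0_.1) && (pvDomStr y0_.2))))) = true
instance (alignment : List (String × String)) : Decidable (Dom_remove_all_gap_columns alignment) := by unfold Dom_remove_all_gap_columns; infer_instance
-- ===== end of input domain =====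

-- B rebuilds the sequences from the transposed columns (zip) instead of A's two index
-- loops with a 'col not in columns_to_remove' scan; A mutates its dict in place (the
-- equivalence proved here is about the return value only).

-- ===== PORT A =====
-- seq[col] is ported with List.getD; exact on Pre_, where 0 ≤ col < len(seq).
def remove_all_gap_columns (alignment : List (String × String)) : List (String × String) :=
  let sequences := alignment.map Prod.snd
  let seq_length := (sequences.headD "").length   -- len(sequences[0]); Pre_ excludes the empty dict, where Python raises IndexError
  let columns_to_remove :=
    (List.range seq_length).filter
      (fun col => sequences.all (fun seq => seq.toList.getD col ' ' == '-'))
  alignment.map (fun p =>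
    (p.1, String.ofList (((List.range seq_length).filter (fun col => col ∉ columns_to_remove)).map
      (fun col => p.2.toList.getD col ' '))))

-- ===== PORT B =====
-- zip(*rows): column j for every j below the minimum row length (getD is exact there).
def pvZipCols (rows : List (List Char)) : List (List Char) :=
  let m := ((rows.map List.length).min?).getD 0
  (List.range m).map (fun j => rows.map (fun r => r.getD j ' '))

def remove_all_gap_columns_alt (alignment : List (String × String)) : List (String × String) :=
  let sequences := (alignment.map Prod.snd).map String.toList
  let kept := (pvZipCols sequences).filter (fun col => col.any (fun c => c != '-'))
  (PySem.List.enumerate alignment).map (fun p =>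
    (p.2.1, String.ofList (kept.map (fun col => col.getD p.1.toNat ' '))))

-- ===== PRECONDITION & SPEC =====
-- Pre_ is exactly the set of inputs on which the Python A returns: a nonempty alignment
-- whose sequences are all at least as long as the first one (otherwise A raises IndexError).
def Pre_remove_all_gap_columns (alignment : List (String × String)) : Prop :=
  alignment ≠ [] ∧ ∀ p ∈ alignment, (alignment.headD ("", "")).2.length ≤ p.2.length
instance (alignment : List (String × String)) : Decidable (Pre_remove_all_gap_columns alignment) := by
  unfold Pre_remove_all_gap_columns; infer_instance

def pvWitness_remove_all_gap_columns : (List (String × String)) := [("a", "-c-"), ("b", "cc-")]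

def Spec_remove_all_gap_columns (alignment : List (String × String)) (out : List (String × String)) : Prop := out = remove_all_gap_columns_alt alignment
instance (alignment : List (String × String)) (out : List (String × String)) : Decidable (Spec_remove_all_gap_columns alignment out) := by unfold Spec_remove_all_gap_columns; infer_instance

-- ===== CLAIM (what is proved, stated in full; the proofs are below) =====
def Claim_equal_remove_all_gap_columns : Prop := ∀ (alignment : List (String × String)), Dom_remove_all_gap_columns alignment → Pre_remove_all_gap_columns alignment → Spec_remove_all_gap_columns alignment (remove_all_gap_columns alignment)

-- ===== LEMMAS AND PROOFS =====

-- Under Pre_, the minimum sequence length is the first sequence's length,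
-- so zip(*sequences) produces exactly len(sequences[0]) columns.
theorem pv_min_eq (q : String × String) (tl : List (String × String))
    (hall : ∀ p ∈ q :: tl, q.2.length ≤ p.2.length) :
    ((((q :: tl).map Prod.snd).map String.toList).map List.length).min? = some q.2.length := by
  rw [List.min?_eq_some_iff]
  constructor
  · simp
  · intro b hb
    simp only [List.map_map, List.mem_map, Function.comp] at hb
    obtain ⟨p, hp, rfl⟩ := hb
    simpa [String.length_toList] using hall p hp

-- The column condition B tests on a transposed column equals the negation of
-- A's all-gap condition on the same column index.
theorem pv_col_cond (al : List (String × String)) (j : Nat) :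
    ((((al.map Prod.snd).map String.toList).map (fun r => r.getD j ' ')).any
        (fun c => c != '-'))
      = !((al.map Prod.snd).all (fun seq => seq.toList.getD j ' ' == '-')) := by
  rw [List.not_all_eq_any_not]
  simp [List.any_map, Function.comp_def, bne]

-- ===== VERDICT (by name: the statement is the Claim_ definition above) =====
theorem remove_all_gap_columns_spec : Claim_equal_remove_all_gap_columns := by
  intro alignment _ hPre
  obtain ⟨hne, hall⟩ := hPre
  obtain ⟨q, tl, rfl⟩ : ∃ q tl, alignment = q :: tl := by
    cases alignment with
    | nil => exact absurd rfl hne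
    | cons a l => exact ⟨a, l, rfl⟩
  simp only [List.headD_cons] at hall
  unfold Spec_remove_all_gap_columns remove_all_gap_columns remove_all_gap_columns_alt pvZipCols
  have e1 : (((q :: tl).map Prod.snd).headD "") = q.2 := rfl
  have e2 : (((((q :: tl).map Prod.snd).map String.toList).map List.length).min?).getD 0
      = q.2.length := by rw [pv_min_eq q tl hall]; rfl
  simp only [e1, e2]
  set al := q :: tl with hal
  set L := q.2.length with hL
  -- A's kept column indices are the range positions where not every sequence has a gap
  have hF : ((List.range L).filter
        (fun col => col ∉ (List.range L).filter
          (fun col => (al.map Prod.snd).all (fun seq => seq.toList.getD col ' ' == '-'))))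
      = (List.range L).filter
          (fun col => !(al.map Prod.snd).all (fun seq => seq.toList.getD col ' ' == '-')) := by
    refine List.filter_congr ?_
    intro x hx
    by_cases h : ((al.map Prod.snd).all (fun seq => seq.toList.getD x ' ' == '-')) = true <;>
      simp only [List.all_map, Function.comp_def, List.getD_eq_getElem?_getD] at h <;>
      simp [List.mem_filter, hx, h, List.all_map, Function.comp_def, List.getD_eq_getElem?_getD]
  -- B's kept columns are A's kept indices, transposed
  have hK : (((List.range L).map
          (fun j => ((al.map Prod.snd).map String.toList).map (fun r => r.getD j ' '))).filter
          (fun col => col.any (fun c => c != '-')))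
      = ((List.range L).filter
            (fun col => !(al.map Prod.snd).all (fun seq => seq.toList.getD col ' ' == '-'))).map
          (fun j => ((al.map Prod.snd).map String.toList).map (fun r => r.getD j ' ')) := by
    rw [List.filter_map]
    congr 1
    refine List.filter_congr ?_
    intro j _
    simpa [Function.comp_def] using pv_col_cond al j
  rw [hF, hK]
  -- now both sides are maps over al / enumerate al: compare entry by entry
  apply List.ext_getElem
  · simp [PySem.List.length_enumerate]
  · intro i h1 h2
    have hi : i < al.length := by simpa using h1
    simp only [List.getElem_map, PySem.List.getElem_enumerate]
    refine Prod.ext (by simp) ?_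
    simp only [List.map_map]
    congr 1
    refine List.map_congr_left ?_
    intro j hj
    simp [Function.comp_def, List.getElem?_eq_getElem hi]
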